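-- pv_equiv track=rewrite | github.com/teppi1995/CTF | 2020_CTF/CODEGATE2020/simplemachine/solver2.py | calc_flag_2
-- ===== SOURCE A (Python) =====
-- def calc_flag_2(key_list, seed = 0xdead):
--     flag_2 = ""
--     for key in key_list:
--         xor_num = ((seed * 2) ^ seed) & 0xffff
--         ans = ((0x10000 - key) ^ xor_num) & 0xffff
--
--         flag_2 += chr(ans & 0xff)
--         flag_2 += chr(ans >> 8)
--
--         seed = xor_num
--
--     return flag_2
-- ===== SOURCE B (Python) =====
-- def calc_flag_2(key_list, seed=0xdead):
--     # pass 1: the xor_num sequence depends only on seed, not on the keys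
--     xors = []
--     s = seed
--     for _ in key_list:
--         s = ((s * 2) ^ s) & 0xffff
--         xors.append(s)
--     # pass 2: decode each key with its xor_num, low byte then high byte
--     return "".join(
--         chr(a & 0xff) + chr(a >> 8)
--         for a in (((0x10000 - k) ^ x) & 0xffff for k, x in zip(key_list, xors))
--     )
-- ===== Notes on version B (the rewrite author's own statement) =====
-- stated objective: alternative
-- what changed: Split A's single stateful loop into two passes: first precompute the key-independent xor_num sequence as a list, then decode the string by zipping keys with that list and joining two-char chunks.
import Mathlib
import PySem

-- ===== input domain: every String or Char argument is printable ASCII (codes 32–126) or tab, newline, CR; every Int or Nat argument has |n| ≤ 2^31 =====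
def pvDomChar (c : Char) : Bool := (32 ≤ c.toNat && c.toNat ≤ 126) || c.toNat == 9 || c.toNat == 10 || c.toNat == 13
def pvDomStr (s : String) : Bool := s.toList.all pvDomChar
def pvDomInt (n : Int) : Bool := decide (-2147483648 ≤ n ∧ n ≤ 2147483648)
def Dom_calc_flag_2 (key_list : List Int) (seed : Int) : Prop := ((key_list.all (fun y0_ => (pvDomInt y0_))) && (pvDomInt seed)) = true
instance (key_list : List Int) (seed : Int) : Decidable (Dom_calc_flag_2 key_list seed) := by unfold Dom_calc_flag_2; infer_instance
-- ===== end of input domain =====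

-- B splits A's single stateful loop into a key-independent xor_num table pass plus a zip/join decode pass (alternative decomposition, same cost).
-- ===== PORT A =====
def calc_flag_2 (key_list : List Int) (seed : Int) : String :=
  (key_list.foldl (fun (st : String × Int) key =>
      let xor_num := PySem.Int.band (PySem.Int.bxor (st.2 * 2) st.2) 0xffff
      let ans := PySem.Int.band (PySem.Int.bxor (0x10000 - key) xor_num) 0xffff
      (((st.1.push (Char.ofNat (PySem.Int.band ans 0xff).toNat)).push
          (Char.ofNat (ans >>> 8).toNat)), xor_num))
    ("", seed)).1

-- ===== PORT B =====
-- pass 1 of Source B: the xor_num sequence, driven only by the seed (one entry per key)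
def pvXors (seed : Int) : List Int → List Int
  | [] => []
  | _ :: ks =>
    let s := PySem.Int.band (PySem.Int.bxor (seed * 2) seed) 0xffff
    s :: pvXors s ks

-- pass 2 of Source B: zip keys with xor_nums, two chars per pair, join
def calc_flag_2_alt (key_list : List Int) (seed : Int) : String :=
  String.ofList (((key_list.zip (pvXors seed key_list)).map (fun p =>
      let a := PySem.Int.band (PySem.Int.bxor (0x10000 - p.1) p.2) 0xffff
      [Char.ofNat (PySem.Int.band a 0xff).toNat, Char.ofNat (a >>> 8).toNat])).flatten)

-- ===== PRECONDITION & SPEC =====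
def Spec_calc_flag_2 (key_list : List Int) (seed : Int) (out : String) : Prop := out = calc_flag_2_alt key_list seed
instance (key_list : List Int) (seed : Int) (out : String) : Decidable (Spec_calc_flag_2 key_list seed out) := by unfold Spec_calc_flag_2; infer_instance

-- ===== CLAIM (what is proved, stated in full; the proofs are below) =====
def Claim_equal_calc_flag_2 : Prop := ∀ (key_list : List Int) (seed : Int), Dom_calc_flag_2 key_list seed → Spec_calc_flag_2 key_list seed (calc_flag_2 key_list seed)

-- ===== LEMMAS AND PROOFS =====

-- ===== VERDICT (by name: the statement is the Claim_ definition above) =====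
theorem calc_flag_2_aux (ks : List Int) : ∀ (seed : Int) (acc : String),
    (ks.foldl (fun (st : String × Int) key =>
      let xor_num := PySem.Int.band (PySem.Int.bxor (st.2 * 2) st.2) 0xffff
      let ans := PySem.Int.band (PySem.Int.bxor (0x10000 - key) xor_num) 0xffff
      (((st.1.push (Char.ofNat (PySem.Int.band ans 0xff).toNat)).push
          (Char.ofNat (ans >>> 8).toNat)), xor_num))
      (acc, seed)).1
    = acc ++ String.ofList (((ks.zip (pvXors seed ks)).map (fun p =>
        let a := PySem.Int.band (PySem.Int.bxor (0x10000 - p.1) p.2) 0xffff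
        [Char.ofNat (PySem.Int.band a 0xff).toNat, Char.ofNat (a >>> 8).toNat])).flatten) := by
  induction ks with
  | nil => intro seed acc; apply String.ext; simp
  | cons k ks ih =>
    intro seed acc
    simp only [List.foldl_cons, pvXors, List.zip_cons_cons, List.map_cons, List.flatten_cons]
    rw [ih]
    apply String.ext
    simp

theorem calc_flag_2_spec : Claim_equal_calc_flag_2 := by
  intro key_list seed _
  unfold Spec_calc_flag_2 calc_flag_2 calc_flag_2_alt
  rw [calc_flag_2_aux]
  apply String.ext; simp
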